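-- pv_equiv track=rewrite | github.com/effort-yq/-baseline | gen_submit_data.py | gen_new_trigger
-- ===== SOURCE A (Python) =====
-- def gen_new_trigger(tokens, trigger):
--     start, end = 0, 0
--     for i in range(len(tokens)):
--         if trigger == tokens[i]:
--             return trigger, [i, i + 1]
--
--     for i in range(len(tokens)):
--         if len(trigger) > len(tokens[i]):
--             if trigger[0] in tokens[i]:
--                 start = i
--             if trigger[-1] in tokens[i]:
--                 end = i+1
--             if end != 0:
--                 return ''.join(tokens[start: end]), [start, end]
--
--         elif len(trigger) == len(tokens[i]):
--             if trigger[0] in tokens[i] and trigger[-1] in tokens[i]: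
--                 start = i
--                 end = i + 1
--                 return ''.join(tokens[start: end]), [start, end]
--
--             if trigger[0] in tokens[i]:
--                 start = i
--             if trigger[-1] in tokens[i]:
--                 end = i + 1
--
--             if end != 0:
--                 return ''.join(tokens[start: end]), [start, end]
--
--         else:
--             if trigger[0] in tokens[i] and trigger[-1] in tokens[i]:
--                 start = i
--                 end = i + 1
--                 return ''.join(tokens[start: end]), [start, end]
--             if trigger[0] in tokens[i]:
--                 start = i
--
--             if trigger[-1] in tokens[i]:
--                 end = i + 1
--
--             if end != 0:
--                 return ''.join(tokens[start: end]), [start, end]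
-- ===== SOURCE B (Python) =====
-- def gen_new_trigger(tokens, trigger):
--     # exact-match pass, kept as in A
--     for i, tok in enumerate(tokens):
--         if trigger == tok:
--             return trigger, [i, i + 1]
--     # end boundary: first token containing the trigger's last character
--     end_j = None
--     for j, tok in enumerate(tokens):
--         if trigger[-1] in tok:
--             end_j = j
--             break
--     if end_j is None:
--         return None
--     # start boundary: last index <= end_j whose token contains the first character, default 0
--     start = 0
--     for i in range(end_j + 1):
--         if trigger[0] in tokens[i]:
--             start = i
--     return ''.join(tokens[start:end_j + 1]), [start, end_j + 1]
-- ===== Notes on version B (the rewrite author's own statement) =====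
-- stated objective: simpler
-- what changed: A's three redundant length-comparison branches (which all perform the same start/end bookkeeping) are replaced by a decomposition: find the first token containing trigger's last char, then separately fold for the last earlier index whose token contains the first char (default 0).
import Mathlib
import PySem

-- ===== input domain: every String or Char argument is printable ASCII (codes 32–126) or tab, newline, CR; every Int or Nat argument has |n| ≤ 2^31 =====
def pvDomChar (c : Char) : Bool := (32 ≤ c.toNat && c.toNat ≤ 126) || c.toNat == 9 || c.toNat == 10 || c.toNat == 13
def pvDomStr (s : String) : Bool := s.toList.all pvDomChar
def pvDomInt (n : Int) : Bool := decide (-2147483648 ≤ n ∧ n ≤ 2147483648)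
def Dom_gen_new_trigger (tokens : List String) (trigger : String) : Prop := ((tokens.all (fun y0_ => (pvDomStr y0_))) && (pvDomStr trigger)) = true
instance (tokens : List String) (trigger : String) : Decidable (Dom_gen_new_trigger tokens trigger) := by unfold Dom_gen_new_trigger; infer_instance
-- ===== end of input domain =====

-- B collapses A's three redundant length-comparison branches into a find-the-end / fold-the-start
-- decomposition; same O(n) cost, simpler control flow (objective: simpler).

-- ===== PORT A =====
-- Python `c in t` for a single character c (substring membership), exact via PySem
def pvChrIn (c : Char) (t : String) : Bool := PySem.Chars.isIn [c] t.toList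

-- first loop of both programs: exact-match scan over indices (identical in Source A and Source B)
def pvLoop1 (trigger : String) : List String → Nat → Option (String × List Int)
  | [], _ => none
  | t :: rest, i =>
    if trigger == t then some (trigger, [(i : Int), (i : Int) + 1])
    else pvLoop1 trigger rest (i + 1)

-- ''.join(tokens[s:e]), [s, e]
def pvJoinSlice (tokens : List String) (s e : Int) : String × List Int :=
  (PySem.Str.join "" (PySem.List.slice tokens (some s) (some e)), [s, e])

-- A's second loop, step for step: three length branches with their sub-ifs in source order
def pvLoop2A (tokens : List String) (trigger : String) (c0 cl : Char) :
    List String → Nat → Int → Option (String × List Int)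
  | [], _, _ => none
  | t :: rest, i, start =>
    if PySem.Str.len trigger > PySem.Str.len t then
      let start := if pvChrIn c0 t then (i : Int) else start
      if pvChrIn cl t then some (pvJoinSlice tokens start ((i : Int) + 1))
      else pvLoop2A tokens trigger c0 cl rest (i + 1) start
    else if PySem.Str.len trigger == PySem.Str.len t then
      if pvChrIn c0 t && pvChrIn cl t then some (pvJoinSlice tokens (i : Int) ((i : Int) + 1))
      else
        let start := if pvChrIn c0 t then (i : Int) else start
        if pvChrIn cl t then some (pvJoinSlice tokens start ((i : Int) + 1))
        else pvLoop2A tokens trigger c0 cl rest (i + 1) start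
    else
      if pvChrIn c0 t && pvChrIn cl t then some (pvJoinSlice tokens (i : Int) ((i : Int) + 1))
      else
        let start := if pvChrIn c0 t then (i : Int) else start
        if pvChrIn cl t then some (pvJoinSlice tokens start ((i : Int) + 1))
        else pvLoop2A tokens trigger c0 cl rest (i + 1) start

def gen_new_trigger (tokens : List String) (trigger : String) : Option (String × List Int) :=
  match pvLoop1 trigger tokens 0 with
  | some r => some r
  | none =>
    match trigger.toList.head?, trigger.toList.getLast? with
    | some c0, some cl => pvLoop2A tokens trigger c0 cl tokens 0 0
    | _, _ => none  -- trigger = "": Python raises IndexError here when tokens ≠ []; excluded by Pre_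

-- ===== PORT B =====
-- Source B's second loop: first index whose token contains the trigger's last character
def pvFindEnd (cl : Char) : List String → Nat → Option Nat
  | [], _ => none
  | t :: rest, j => if pvChrIn cl t then some j else pvFindEnd cl rest (j + 1)

-- Source B's third loop body: keep the last index whose token contains the first character
def pvUpd (tokens : List String) (c0 : Char) (acc : Int) (i : Nat) : Int :=
  if pvChrIn c0 (tokens.getD i "") then (i : Int) else acc

def gen_new_trigger_alt (tokens : List String) (trigger : String) : Option (String × List Int) :=
  match pvLoop1 trigger tokens 0 with
  | some r => some r
  | none =>
    match trigger.toList.getLast? with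
    | none => none  -- trigger = "": Python raises IndexError here when tokens ≠ []; excluded by Pre_
    | some cl =>
      match pvFindEnd cl tokens 0 with
      | none => none
      | some j =>
        match trigger.toList.head? with
        | none => none  -- unreachable: getLast? returned some
        | some c0 =>
          let start := (List.range (j + 1)).foldl (pvUpd tokens c0) 0
          some (pvJoinSlice tokens start ((j : Int) + 1))

-- ===== PRECONDITION & SPEC =====
-- Pre_ excludes only the inputs where A raises IndexError (empty trigger indexed while
-- scanning a non-empty token list that contains no exact match for "").
def Pre_gen_new_trigger (tokens : List String) (trigger : String) : Prop :=
  trigger ≠ "" ∨ tokens = [] ∨ trigger ∈ tokens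
instance (tokens : List String) (trigger : String) : Decidable (Pre_gen_new_trigger tokens trigger) := by unfold Pre_gen_new_trigger; infer_instance
def pvWitness_gen_new_trigger : List String × String := (["the", "big cat"], "bat")

def Spec_gen_new_trigger (tokens : List String) (trigger : String) (out : Option (String × List Int)) : Prop := out = gen_new_trigger_alt tokens trigger
instance (tokens : List String) (trigger : String) (out : Option (String × List Int)) : Decidable (Spec_gen_new_trigger tokens trigger out) := by unfold Spec_gen_new_trigger; infer_instance

-- ===== CLAIM (what is proved, stated in full; the proofs are below) =====
def Claim_equal_gen_new_trigger : Prop := ∀ (tokens : List String) (trigger : String), Dom_gen_new_trigger tokens trigger → Pre_gen_new_trigger tokens trigger → Spec_gen_new_trigger tokens trigger (gen_new_trigger tokens trigger)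

-- ===== LEMMAS AND PROOFS =====

theorem pvFindEnd_ge (cl : Char) : ∀ (l : List String) (k j : Nat), pvFindEnd cl l k = some j → k ≤ j := by
  intro l
  induction l with
  | nil => intro k j h; simp [pvFindEnd] at h
  | cons t rest ih =>
    intro k j h
    by_cases hb : pvChrIn cl t
    · simp [pvFindEnd, hb] at h; omega
    · simp [pvFindEnd, hb] at h
      have := ih (k + 1) j h
      omega

-- A's second loop equals: find the first end index, fold the start updates over the prefix
theorem pvLoop2A_eq (tokens : List String) (trigger : String) (c0 cl : Char) :
    ∀ (rest : List String) (k : Nat) (s : Int), tokens.drop k = rest →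
      pvLoop2A tokens trigger c0 cl rest k s =
        match pvFindEnd cl rest k with
        | none => none
        | some j => some (pvJoinSlice tokens
            ((List.range' k (j + 1 - k)).foldl (pvUpd tokens c0) s) ((j : Int) + 1)) := by
  intro rest
  induction rest with
  | nil => intro k s h; simp [pvLoop2A, pvFindEnd]
  | cons t rest ih =>
    intro k s h
    have h0 : tokens[k]? = some t := by
      have h1 : (tokens.drop k)[0]? = some t := by rw [h]; rfl
      simpa using h1
    have hdrop : tokens.drop (k + 1) = rest := by
      have : tokens.drop (k + 1) = (tokens.drop k).tail := by
        rw [← List.drop_drop]; simp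
      rw [this, h]; rfl
    have hupd : pvUpd tokens c0 s k = (if pvChrIn c0 t then (k : Int) else s) := by
      simp [pvUpd, List.getD, h0]
    have hstep : pvLoop2A tokens trigger c0 cl (t :: rest) k s =
        (if pvChrIn cl t then some (pvJoinSlice tokens (pvUpd tokens c0 s k) ((k : Int) + 1))
         else pvLoop2A tokens trigger c0 cl rest (k + 1) (pvUpd tokens c0 s k)) := by
      rw [hupd]
      by_cases hb0 : pvChrIn c0 t <;> by_cases hbl : pvChrIn cl t <;>
        simp [pvLoop2A, hb0, hbl]
    rw [hstep]
    by_cases hbl : pvChrIn cl t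
    · have h1 : k + 1 - k = 1 := by omega
      simp [pvFindEnd, hbl, h1, List.range'_one]
    · simp only [pvFindEnd, hbl, if_neg, Bool.false_eq_true, not_false_eq_true]
      rw [ih (k + 1) (pvUpd tokens c0 s k) hdrop]
      cases hfe : pvFindEnd cl rest (k + 1) with
      | none => simp
      | some j =>
        have hkj : k + 1 ≤ j := pvFindEnd_ge cl rest (k + 1) j hfe
        have hr : List.range' k (j + 1 - k) = k :: List.range' (k + 1) (j + 1 - (k + 1)) := by
          have h1 : j + 1 - k = (j + 1 - (k + 1)) + 1 := by omega
          rw [h1, List.range'_succ]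
        simp [hr]

theorem gen_new_trigger_spec : Claim_equal_gen_new_trigger := by
  intro tokens trigger _ _
  unfold Spec_gen_new_trigger gen_new_trigger gen_new_trigger_alt
  cases hE : pvLoop1 trigger tokens 0 with
  | some r => rfl
  | none =>
    cases hL : trigger.toList.getLast? with
    | none =>
      have hnil : trigger.toList = [] := List.getLast?_eq_none_iff.mp hL
      simp [hnil]
    | some cl =>
      have hne : trigger.toList ≠ [] := by
        intro h; rw [h] at hL; simp at hL
      obtain ⟨c0, hH⟩ : ∃ c0, trigger.toList.head? = some c0 := by
        cases hh : trigger.toList.head? with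
        | none => exact absurd (List.head?_eq_none_iff.mp hh) hne
        | some c => exact ⟨c, rfl⟩
      simp only [hH]
      rw [pvLoop2A_eq tokens trigger c0 cl tokens 0 0 (by simp)]
      cases hfe : pvFindEnd cl tokens 0 with
      | none => rfl
      | some j =>
        simp [List.range_eq_range']

-- ===== VERDICT (by name: the statement is the Claim_ definition above) =====
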